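-- pv_equiv track=rewrite | github.com/Undead34/logrhythm-trend-vision-one | utils/__init__.py | order_dict_by_relevance
-- ===== SOURCE A (Python) =====
-- def order_dict_by_relevance(d, whitelist):
--     # Split the whitelist into a list
--     whitelist = whitelist.split()
--
--     # Create two empty dictionaries
--     whitelisted_dict = {}
--     non_whitelisted_dict = {}
--
--     # Iterate over the items in the dictionary
--     for k, v in d.items():
--         # If the key is in the whitelist, add it to the whitelisted_dict
--         if k in whitelist:
--             whitelisted_dict[k] = v
--         # Otherwise, add it to the non_whitelisted_dict
--         else:
--             non_whitelisted_dict[k] = v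
--
--     # Merge the two dictionaries
--     ordered_dict = {**whitelisted_dict, **non_whitelisted_dict}
--
--     # Return the ordered dictionary
--     return ordered_dict
-- ===== SOURCE B (Python) =====
-- def order_dict_by_relevance(d, whitelist):
--     # One stable sort: whitelisted keys (key False) come before the rest,
--     # each group keeping its original insertion order.
--     wl = whitelist.split()
--     return dict(sorted(d.items(), key=lambda kv: kv[0] not in wl))
-- ===== Notes on version B (the rewrite author's own statement) =====
-- stated objective: idiomatic
-- what changed: Replaces A's two-bucket partition into two dicts plus a merge by a single stable sort of the items on the boolean key 'not whitelisted' (whitelisted first, each group in insertion order), wrapped in dict(); Pre_ excludes association lists with duplicate keys, which cannot arise from a Python dict argument.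
import Mathlib
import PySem

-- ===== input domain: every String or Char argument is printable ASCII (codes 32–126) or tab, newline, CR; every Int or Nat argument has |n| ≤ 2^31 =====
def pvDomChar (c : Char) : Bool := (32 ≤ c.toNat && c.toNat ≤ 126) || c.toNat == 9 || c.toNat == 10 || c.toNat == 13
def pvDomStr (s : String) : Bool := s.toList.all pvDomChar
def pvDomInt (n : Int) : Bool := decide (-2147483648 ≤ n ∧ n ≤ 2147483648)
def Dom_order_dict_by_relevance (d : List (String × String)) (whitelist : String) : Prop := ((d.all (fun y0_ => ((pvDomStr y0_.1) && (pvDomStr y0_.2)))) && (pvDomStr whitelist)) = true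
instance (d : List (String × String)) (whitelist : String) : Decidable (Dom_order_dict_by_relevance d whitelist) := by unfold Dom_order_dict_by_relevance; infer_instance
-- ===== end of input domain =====

-- B replaces A's two-bucket partition and dict merge by ONE stable sort on the
-- boolean key "not whitelisted" (idiomatic; same asymptotic cost class on these inputs).

-- ===== PORT A =====
-- A: split the whitelist, partition d's items into two dicts, merge them.
def order_dict_by_relevance (d : List (String × String)) (whitelist : String) : List (String × String) :=
  let wl := PySem.Str.split₀ whitelist
  -- for k, v in d.items(): put (k, v) into whitelisted_dict or non_whitelisted_dict
  let s := d.foldl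
    (fun (s : PySem.Dict String String × PySem.Dict String String) kv =>
      if wl.contains kv.1 then (s.1.insert kv.1 kv.2, s.2) else (s.1, s.2.insert kv.1 kv.2))
    (PySem.Dict.empty, PySem.Dict.empty)
  -- ordered_dict = {**whitelisted_dict, **non_whitelisted_dict}
  (s.1.update s.2.items).items

-- ===== PORT B =====
-- B: dict(sorted(d.items(), key=lambda kv: kv[0] not in wl))
def order_dict_by_relevance_alt (d : List (String × String)) (whitelist : String) : List (String × String) :=
  let wl := PySem.Str.split₀ whitelist
  (PySem.Dict.ofList (PySem.List.sorted d (fun kv => !(wl.contains kv.1)) false)).items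

-- ===== PRECONDITION & SPEC =====
-- Pre_ excludes association lists with duplicate keys: they do not arise from a Python
-- dict argument (dict keys are unique), so the ports' behaviour there is about no Python input.
def Pre_order_dict_by_relevance (d : List (String × String)) (whitelist : String) : Prop :=
  (d.map Prod.fst).Nodup
instance (d : List (String × String)) (whitelist : String) : Decidable (Pre_order_dict_by_relevance d whitelist) := by unfold Pre_order_dict_by_relevance; infer_instance
def pvWitness_order_dict_by_relevance : (List (String × String)) × String :=
  ([("a", "1"), ("b", "2"), ("c", "3")], "b c")

def Spec_order_dict_by_relevance (d : List (String × String)) (whitelist : String) (out : List (String × String)) : Prop := out = order_dict_by_relevance_alt d whitelist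
instance (d : List (String × String)) (whitelist : String) (out : List (String × String)) : Decidable (Spec_order_dict_by_relevance d whitelist out) := by unfold Spec_order_dict_by_relevance; infer_instance

-- ===== CLAIM (what is proved, stated in full; the proofs are below) =====
def Claim_equal_order_dict_by_relevance : Prop := ∀ (d : List (String × String)) (whitelist : String), Dom_order_dict_by_relevance d whitelist → Pre_order_dict_by_relevance d whitelist → Spec_order_dict_by_relevance d whitelist (order_dict_by_relevance d whitelist)

-- ===== LEMMAS AND PROOFS =====

-- insertBy skips a prefix it never inserts before
theorem insertBy_append_of_forall_not_before {α : Type} (before : α → α → Bool) (x : α)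
    (F T : List α) (h : ∀ y ∈ F, before x y = false) :
    PySem.List.insertBy before x (F ++ T) = F ++ PySem.List.insertBy before x T := by
  induction F with
  | nil => simp
  | cons a F ih =>
    simp only [List.cons_append, PySem.List.insertBy, h a (by simp)]
    simp [ih (fun y hy => h y (by simp [hy]))]

-- a stable sort on a Bool key is exactly the partition: false group first, each in order
theorem sorted_bool_eq_partition {α : Type} (xs : List α) (key : α → Bool) :
    PySem.List.sorted xs key false
      = xs.filter (fun x => !key x) ++ xs.filter key := by
  rw [PySem.List.sorted_eq_foldl_insertBy]
  suffices h : ∀ (l : List α) (F T : List α),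
      (∀ y ∈ F, key y = false) → (∀ y ∈ T, key y = true) →
      l.foldl (fun acc x => PySem.List.insertBy (fun a b => decide (key a < key b)) x acc) (F ++ T)
        = (F ++ l.filter (fun x => !key x)) ++ (T ++ l.filter key) by
    simpa using h xs [] [] (by simp) (by simp)
  intro l
  induction l with
  | nil => simp
  | cons x l ih =>
    intro F T hF hT
    simp only [List.foldl_cons]
    by_cases hx : key x = true
    · have hstep : PySem.List.insertBy (fun a b => decide (key a < key b)) x (F ++ T)
          = F ++ (T ++ [x]) := by
        rw [insertBy_append_of_forall_not_before _ _ _ _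
          (by intro y hy; simp [hF y hy, hx, Bool.lt_iff])]
        rw [PySem.List.insertBy_of_forall_not_before _ _ _
          (by intro y hy; simp [hT y hy, hx])]
      rw [hstep, ih F (T ++ [x]) hF (by
        intro y hy; rcases List.mem_append.mp hy with h' | h'
        · exact hT y h'
        · simp at h'; simpa [h'] using hx)]
      simp [hx]
    · have hx' : key x = false := by simpa using hx
      have hstep : PySem.List.insertBy (fun a b => decide (key a < key b)) x (F ++ T)
          = (F ++ [x]) ++ T := by
        rw [insertBy_append_of_forall_not_before _ _ _ _
          (by intro y hy; simp [hF y hy, hx'])]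
        cases T with
        | nil => simp [PySem.List.insertBy]
        | cons t T' =>
          have : key t = true := hT t (by simp)
          simp [PySem.List.insertBy, this, hx', Bool.lt_iff]
      rw [hstep, ih (F ++ [x]) T (by
        intro y hy; rcases List.mem_append.mp hy with h' | h'
        · exact hF y h'
        · simp at h'; simpa [h'] using hx') hT]
      simp [hx']

-- a fold of inserts over pairs with fresh, distinct keys just appends the pairs
theorem items_update_fresh (d : PySem.Dict String String) (l : List (String × String))
    (hfresh : ∀ a ∈ l, d.contains a.1 = false) (hnd : (l.map Prod.fst).Nodup) :
    (d.update l).items = d.items ++ l := by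
  have := PySem.Dict.items_foldl_insert_fresh l Prod.fst Prod.snd d hfresh hnd
  simpa [PySem.Dict.update] using this

-- A's partition loop, componentwise: two independent folds over the two filters
theorem pair_fold_eq_filters (p : String × String → Bool) (l : List (String × String))
    (w n : PySem.Dict String String) :
    l.foldl (fun (s : PySem.Dict String String × PySem.Dict String String) kv =>
        if p kv then (s.1.insert kv.1 kv.2, s.2) else (s.1, s.2.insert kv.1 kv.2)) (w, n)
      = ((l.filter p).foldl (fun d kv => d.insert kv.1 kv.2) w,
         (l.filter (fun kv => !p kv)).foldl (fun d kv => d.insert kv.1 kv.2) n) := by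
  induction l generalizing w n with
  | nil => simp
  | cons x l ih =>
    by_cases hx : p x = true
    · simp [hx, ih]
    · simp [hx, ih]

-- keys of a filtered sublist stay distinct
theorem nodup_keys_filter (p : String × String → Bool) (d : List (String × String))
    (h : (d.map Prod.fst).Nodup) : ((d.filter p).map Prod.fst).Nodup :=
  ((d.filter_sublist (p := p)).map Prod.fst).nodup h

theorem contains_empty_false (l : List (String × String)) :
    ∀ a ∈ l, (PySem.Dict.empty : PySem.Dict String String).contains a.1 = false := by
  intro a _; simp [PySem.Dict.contains, PySem.Dict.empty]

-- ===== VERDICT (by name: the statement is the Claim_ definition above) =====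
theorem order_dict_by_relevance_spec : Claim_equal_order_dict_by_relevance := by
  intro d whitelist _ hpre
  unfold Spec_order_dict_by_relevance order_dict_by_relevance order_dict_by_relevance_alt
  dsimp only
  set wl := PySem.Str.split₀ whitelist with hwl
  set p : String × String → Bool := fun kv => wl.contains kv.1 with hp
  -- B's side: the stable Bool sort is the partition, and ofList of nodup-key pairs is the identity
  have hBsorted : PySem.List.sorted d (fun kv => !(wl.contains kv.1)) false
      = d.filter p ++ d.filter (fun kv => !p kv) := by
    simpa [hp] using sorted_bool_eq_partition d (fun kv => !(wl.contains kv.1))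
  -- the partitioned list is a permutation of d, so its keys are Nodup
  have hperm : (d.filter p ++ d.filter (fun kv => !p kv)).Perm d := by
    simpa using (List.filter_append_perm p d)
  have hndB : ((d.filter p ++ d.filter (fun kv => !p kv)).map Prod.fst).Nodup :=
    ((hperm.map Prod.fst).nodup_iff).mpr hpre
  have hB : (PySem.Dict.ofList (PySem.List.sorted d (fun kv => !(wl.contains kv.1)) false)).items
      = d.filter p ++ d.filter (fun kv => !p kv) := by
    rw [hBsorted, PySem.Dict.ofList,
      items_update_fresh _ _ (contains_empty_false _) hndB]
    simp [PySem.Dict.empty]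
  -- A's side: the pair fold is two filter folds; each appends fresh keys to an empty dict
  have hW : ((d.filter p).foldl (fun dd kv => dd.insert kv.1 kv.2) PySem.Dict.empty).items
      = d.filter p := by
    have := items_update_fresh PySem.Dict.empty (d.filter p)
      (contains_empty_false _) (nodup_keys_filter p d hpre)
    simpa [PySem.Dict.update, PySem.Dict.empty] using this
  have hN : ((d.filter (fun kv => !p kv)).foldl (fun dd kv => dd.insert kv.1 kv.2) PySem.Dict.empty).items
      = d.filter (fun kv => !p kv) := by
    have := items_update_fresh PySem.Dict.empty (d.filter (fun kv => !p kv))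
      (contains_empty_false _) (nodup_keys_filter _ d hpre)
    simpa [PySem.Dict.update, PySem.Dict.empty] using this
  -- the non-whitelisted keys are fresh for the whitelisted dict
  have hdisj : ∀ a ∈ d.filter (fun kv => !p kv),
      (((d.filter p).foldl (fun dd kv => dd.insert kv.1 kv.2) PySem.Dict.empty) :
        PySem.Dict String String).contains a.1 = false := by
    intro a ha
    rw [Bool.eq_false_iff]
    intro hc
    have hmem : a.1 ∈ ((d.filter p).map Prod.fst) := by
      have := (PySem.Dict.contains_iff_mem_keys _ a.1).mp hc
      simpa [PySem.Dict.keys, hW] using this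
    rcases List.mem_map.mp hmem with ⟨b, hb, hab⟩
    have hpa : p a = false := by
      have := List.of_mem_filter ha; simpa using this
    have hpb : p b = true := List.of_mem_filter hb
    -- a and b are entries of d with the same key; Nodup keys force a = b
    have hnd := hndB
    have : a.1 = b.1 := hab.symm
    have hpa' : p b = false := by
      simpa [hp, ← this] using hpa
    rw [hpb] at hpa'; exact Bool.noConfusion hpa'
  rw [pair_fold_eq_filters]
  rw [items_update_fresh _ _ (by rw [hN]; exact hdisj) (by rw [hN]; exact nodup_keys_filter _ d hpre)]
  rw [hW, hN, hB]
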